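-- pv_equiv track=rewrite | github.com/anavaicum/PyCharm- | lab 2/lab 2 hausaufgabe.py | perechi
-- ===== SOURCE A (Python) =====
-- def perechi(numbers):
--     count=0
--     for i in range (0,len(numbers)-1):
--         for j in range(i+1,len(numbers)):
--             if numbers[i]%10 == numbers[j]//10%10:
--                 if numbers[i]//10%10==numbers[j]%10:
--                     count +=1
--     return count
-- ===== SOURCE B (Python) =====
-- def perechi(numbers):
--     counts = {}
--     total = 0
--     for x in numbers:
--         total += counts.get((x // 10 % 10, x % 10), 0)
--         key = (x % 10, x // 10 % 10)
--         counts[key] = counts.get(key, 0) + 1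
--     return total
-- ===== Notes on version B (the rewrite author's own statement) =====
-- stated objective: faster
-- what changed: Replaced the O(n^2) all-pairs double loop by a single pass that keeps a hash-map counter of (last digit, tens digit) keys and, for each element, adds the count of earlier elements whose key is the swapped pair.
import Mathlib
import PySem

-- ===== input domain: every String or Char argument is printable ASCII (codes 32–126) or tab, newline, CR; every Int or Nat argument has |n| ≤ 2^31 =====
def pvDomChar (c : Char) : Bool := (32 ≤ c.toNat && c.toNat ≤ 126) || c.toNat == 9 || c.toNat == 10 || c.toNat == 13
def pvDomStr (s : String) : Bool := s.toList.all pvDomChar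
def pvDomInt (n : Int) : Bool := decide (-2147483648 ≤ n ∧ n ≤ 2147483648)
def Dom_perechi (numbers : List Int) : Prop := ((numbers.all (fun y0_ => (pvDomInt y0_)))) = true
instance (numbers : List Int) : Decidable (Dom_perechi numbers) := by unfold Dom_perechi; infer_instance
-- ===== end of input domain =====

-- B replaces A's quadratic all-pairs scan by a one-pass digit-pair counter dictionary (asymptotically faster).

-- ===== PORT A =====
def perechi (numbers : List Int) : Int :=
  (PySem.List.pyRange 0 ((numbers.length : Int) - 1) 1).foldl (fun count i =>
    (PySem.List.pyRange (i + 1) (numbers.length : Int) 1).foldl (fun count j =>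
      if PySem.Int.mod (PySem.List.pyGetD numbers i 0) 10 ==
         PySem.Int.mod (PySem.Int.floordiv (PySem.List.pyGetD numbers j 0) 10) 10 then
        if PySem.Int.mod (PySem.Int.floordiv (PySem.List.pyGetD numbers i 0) 10) 10 ==
           PySem.Int.mod (PySem.List.pyGetD numbers j 0) 10 then count + 1 else count
      else count) count) 0

-- ===== PORT B =====
def perechi_alt (numbers : List Int) : Int :=
  (numbers.foldl (fun st x =>
      let total := st.2 + st.1.getD (PySem.Int.mod (PySem.Int.floordiv x 10) 10, PySem.Int.mod x 10) 0
      (st.1.modify (PySem.Int.mod x 10, PySem.Int.mod (PySem.Int.floordiv x 10) 10) 0 (· + 1), total))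
    ((PySem.Dict.empty : PySem.Dict (Int × Int) Int), (0 : Int))).2

-- ===== PRECONDITION & SPEC =====
def Spec_perechi (numbers : List Int) (out : Int) : Prop := out = perechi_alt numbers
instance (numbers : List Int) (out : Int) : Decidable (Spec_perechi numbers out) := by unfold Spec_perechi; infer_instance

-- ===== CLAIM (what is proved, stated in full; the proofs are below) =====
def Claim_equal_perechi : Prop := ∀ (numbers : List Int), Dom_perechi numbers → Spec_perechi numbers (perechi numbers)

-- ===== LEMMAS AND PROOFS =====

-- A's pair test for (earlier element a, later element b)
def pvPa (a b : Int) : Bool :=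
  (PySem.Int.mod a 10 == PySem.Int.mod (PySem.Int.floordiv b 10) 10) &&
  (PySem.Int.mod (PySem.Int.floordiv a 10) 10 == PySem.Int.mod b 10)

-- the digit pair B stores for each element, and the swapped pair it looks up
def pvK (x : Int) : Int × Int := (PySem.Int.mod x 10, PySem.Int.mod (PySem.Int.floordiv x 10) 10)
def pvQ (x : Int) : Int × Int := (PySem.Int.mod (PySem.Int.floordiv x 10) 10, PySem.Int.mod x 10)

theorem pvPa_eq_beq (a b : Int) : pvPa a b = (pvK a == pvQ b) := rfl

-- B's counter dictionary after processing xs counts, for each key, the elements with that digit pair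
theorem pvDict_getD (xs : List Int) (k : Int × Int) :
    (xs.foldl (fun d y => d.modify (pvK y) 0 (· + 1)) PySem.Dict.empty).getD k 0
      = ((xs.countP (fun y => pvK y == k)) : Int) := by
  have h2 := PySem.Dict.getD_foldl_modify_add_one (xs.map pvK) PySem.Dict.empty k
  simp only [List.foldl_map] at h2
  rw [h2]
  simp [List.count_eq_countP, List.countP_map, Function.comp_def]

theorem pvAlt_fst (xs : List Int) (d : PySem.Dict (Int × Int) Int) (t : Int) :
    (xs.foldl (fun st x =>
      let total := st.2 + st.1.getD (PySem.Int.mod (PySem.Int.floordiv x 10) 10, PySem.Int.mod x 10) 0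
      (st.1.modify (PySem.Int.mod x 10, PySem.Int.mod (PySem.Int.floordiv x 10) 10) 0 (· + 1), total))
      (d, t)).1 = xs.foldl (fun d y => d.modify (pvK y) 0 (· + 1)) d := by
  induction xs generalizing d t with
  | nil => rfl
  | cons x xs ih => simpa [pvK] using ih _ _

theorem pvAlt_snoc (xs : List Int) (x : Int) :
    perechi_alt (xs ++ [x]) = perechi_alt xs + ((xs.countP (fun y => pvPa y x)) : Int) := by
  unfold perechi_alt
  rw [List.foldl_append]
  simp only [List.foldl_cons, List.foldl_nil]
  rw [pvAlt_fst xs PySem.Dict.empty 0]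
  rw [pvDict_getD xs (PySem.Int.mod (PySem.Int.floordiv x 10) 10, PySem.Int.mod x 10)]
  have hp : (fun y => pvK y == (PySem.Int.mod (PySem.Int.floordiv x 10) 10, PySem.Int.mod x 10))
      = fun y => pvPa y x := funext fun y => (pvPa_eq_beq y x).symm
  rw [hp]

-- A rewritten as a sum over the outer indices
def pvF (xs : List Int) : Int :=
  ((PySem.List.pyRange 0 ((xs.length : Int) - 1) 1).map (fun i =>
    (((xs.drop (i + 1).toNat).countP (fun y => pvPa (PySem.List.pyGetD xs i 0) y)) : Int))).sum

theorem perechi_eq_pvF (xs : List Int) : perechi xs = pvF xs := by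
  unfold perechi pvF
  rw [PySem.List.foldl_congr_mem _ _ (fun count i =>
    count + (((xs.drop (i + 1).toNat).countP (fun y => pvPa (PySem.List.pyGetD xs i 0) y)) : Int)) _ ?hcong]
  case hcong =>
    intro acc i hi
    have h0 : (0:Int) ≤ i + 1 := by
      have := (PySem.List.mem_pyRange_one.mp hi).1; omega
    rw [PySem.List.foldl_pyRange_pyGetD' xs 0
      (fun count y =>
        if PySem.Int.mod (PySem.List.pyGetD xs i 0) 10 ==
           PySem.Int.mod (PySem.Int.floordiv y 10) 10 then
          if PySem.Int.mod (PySem.Int.floordiv (PySem.List.pyGetD xs i 0) 10) 10 ==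
             PySem.Int.mod y 10 then count + 1 else count
        else count) acc h0]
    rw [PySem.List.foldl_congr_mem _ _ (fun count y =>
      if pvPa (PySem.List.pyGetD xs i 0) y then count + 1 else count) _ ?hin]
    case hin =>
      intro acc y _
      simp only [pvPa, Bool.and_eq_true, beq_iff_eq]
      split_ifs <;> simp_all
    rw [PySem.List.foldl_if_add_one]
  rw [PySem.List.foldl_add]
  simp

theorem pvF_snoc (xs : List Int) (x : Int) :
    pvF (xs ++ [x]) = pvF xs + ((xs.countP (fun y => pvPa y x)) : Int) := by
  rcases List.eq_nil_or_concat' xs with rfl | ⟨ys, y, rfl⟩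
  · simp [pvF]
  · set l := ys ++ [y] with hl
    have hn : 1 ≤ l.length := by simp [hl]
    unfold pvF
    have hlen : (((l ++ [x]).length : Int)) - 1 = (l.length : Int) := by simp
    rw [hlen]
    have hsplit : PySem.List.pyRange 0 (l.length : Int) 1 =
        PySem.List.pyRange 0 ((l.length : Int) - 1) 1 ++ [(l.length : Int) - 1] := by
      conv_lhs => rw [show ((l.length : Int)) = ((l.length : Int) - 1) + 1 by ring]
      exact PySem.List.pyRange_one_succ_right (by omega)
    rw [hsplit, List.map_append, List.sum_append]
    -- terms over the old range gain exactly the indicator for the appended x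
    have hterm : ∀ i ∈ PySem.List.pyRange 0 ((l.length : Int) - 1) 1,
        (((((l ++ [x]).drop (i + 1).toNat).countP
            (fun y => pvPa (PySem.List.pyGetD (l ++ [x]) i 0) y)) : Nat) : Int)
        = (((l.drop (i + 1).toNat).countP (fun y => pvPa (PySem.List.pyGetD l i 0) y)) : Int)
          + (if pvPa (PySem.List.pyGetD l i 0) x then (1:Int) else 0) := by
      intro i hi
      obtain ⟨hi0, hi1⟩ := PySem.List.mem_pyRange_one.mp hi
      have hget : PySem.List.pyGetD (l ++ [x]) i 0 = PySem.List.pyGetD l i 0 := by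
        have h2 : i < ((l ++ [x]).length : Int) := by
          simp only [List.length_append, List.length_singleton]; push_cast; omega
        have h3 : i < (l.length : Int) := by omega
        rw [PySem.List.pyGetD_eq_getElem (l ++ [x]) 0 hi0 h2,
          PySem.List.pyGetD_eq_getElem l 0 hi0 h3]
        exact List.getElem_append_left (by omega)
      have hdrop : (l ++ [x]).drop (i + 1).toNat = l.drop (i + 1).toNat ++ [x] :=
        List.drop_append_of_le_length (by omega)
      rw [hget, hdrop, List.countP_append]
      by_cases hx : pvPa (PySem.List.pyGetD l i 0) x <;>
        simp [List.countP_nil, hx]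
    rw [List.map_congr_left hterm]
    -- the last outer index drops all of l, leaving exactly [x]
    have hlast : (((((l ++ [x]).drop (((l.length : Int) - 1) + 1).toNat).countP
        (fun y => pvPa (PySem.List.pyGetD (l ++ [x]) ((l.length : Int) - 1) 0) y)) : Nat) : Int)
        = (if pvPa (PySem.List.pyGetD l ((l.length : Int) - 1) 0) x then (1:Int) else 0) := by
      have h1 : (((l.length : Int) - 1) + 1).toNat = l.length := by omega
      have hget : PySem.List.pyGetD (l ++ [x]) ((l.length : Int) - 1) 0
          = PySem.List.pyGetD l ((l.length : Int) - 1) 0 := by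
        have hi0 : (0:Int) ≤ (l.length : Int) - 1 := by omega
        have h2 : (l.length : Int) - 1 < ((l ++ [x]).length : Int) := by
          simp only [List.length_append, List.length_singleton]; push_cast; omega
        have h3 : (l.length : Int) - 1 < (l.length : Int) := by omega
        rw [PySem.List.pyGetD_eq_getElem (l ++ [x]) 0 hi0 h2,
          PySem.List.pyGetD_eq_getElem l 0 hi0 h3]
        exact List.getElem_append_left (by omega)
      rw [h1, hget, List.drop_left]
      by_cases hx : pvPa (PySem.List.pyGetD l ((l.length : Int) - 1) 0) x <;>
        simp [List.countP_nil, hx]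
    rw [List.map_singleton, List.sum_singleton, hlast]
    have hdistr : ((PySem.List.pyRange 0 ((l.length : Int) - 1) 1).map (fun i =>
        (((l.drop (i + 1).toNat).countP (fun y => pvPa (PySem.List.pyGetD l i 0) y)) : Int)
          + (if pvPa (PySem.List.pyGetD l i 0) x then (1:Int) else 0))).sum
        = ((PySem.List.pyRange 0 ((l.length : Int) - 1) 1).map (fun i =>
            (((l.drop (i + 1).toNat).countP (fun y => pvPa (PySem.List.pyGetD l i 0) y)) : Int))).sum
          + ((PySem.List.pyRange 0 ((l.length : Int) - 1) 1).map (fun i =>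
            (if pvPa (PySem.List.pyGetD l i 0) x then (1:Int) else 0))).sum :=
      PySem.List.sum_map_add_int _ _ _
    rw [hdistr]
    -- the indicator sum over ALL indices of l is countP over l
    have hind : ((PySem.List.pyRange 0 ((l.length : Int) - 1) 1).map (fun i =>
          (if pvPa (PySem.List.pyGetD l i 0) x then (1:Int) else 0))).sum
        + (if pvPa (PySem.List.pyGetD l ((l.length : Int) - 1) 0) x then (1:Int) else 0)
        = ((l.countP (fun y => pvPa y x)) : Int) := by
      have hs := congrArg (fun t => (t.map (fun i =>
          (if pvPa (PySem.List.pyGetD l i 0) x then (1:Int) else 0))).sum) hsplit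
      simp only [List.map_append, List.sum_append, List.map_singleton, List.sum_singleton] at hs
      rw [← hs]
      have hmm : (PySem.List.pyRange 0 (l.length : Int) 1).map (fun i =>
            (if pvPa (PySem.List.pyGetD l i 0) x then (1:Int) else 0))
          = ((PySem.List.pyRange 0 (l.length : Int) 1).map (fun i =>
              PySem.List.pyGetD l i 0)).map (fun y => if pvPa y x then (1:Int) else 0) := by
        rw [List.map_map]; rfl
      rw [hmm, PySem.List.map_pyGetD_pyRange_zero' l 0]
      exact PySem.List.sum_map_ite_one_zero _ _
    rw [← hind]
    ring

theorem perechi_agree (xs : List Int) : perechi xs = perechi_alt xs := by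
  induction xs using List.reverseRecOn with
  | nil => rfl
  | append_singleton ys y ih =>
    rw [perechi_eq_pvF, pvF_snoc, ← perechi_eq_pvF, ih, pvAlt_snoc]

-- ===== VERDICT (by name: the statement is the Claim_ definition above) =====
theorem perechi_spec : Claim_equal_perechi := by
  intro numbers _
  unfold Spec_perechi
  exact perechi_agree numbers
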